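-- pv_equiv track=rewrite | github.com/knoffi/cone-measure | venv/coneVolume.py | minLamb
-- ===== SOURCE A (Python) =====
-- def minLamb(lamb, j):
--     temp = lamb[j]
--     i = j
--     index = j
--     while i < len(lamb):
--         if lamb[i] < temp:
--             temp = lamb[i]
--             index = i
--         i += 1
--     return index
-- ===== SOURCE B (Python) =====
-- def minLamb(lamb, j):
--     n = len(lamb)
--     m = min(lamb[i] for i in range(j, n))
--     for i in range(j, n):
--         if lamb[i] == m:
--             return i
-- ===== Notes on version B (the rewrite author's own statement) =====
-- stated objective: simpler
-- what changed: Replaces the single-pass running-minimum loop that tracks (temp, index) state with a stateless two-pass decomposition: first compute the minimum value over range(j, len(lamb)), then return the first index in that range holding it.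
import Mathlib
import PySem

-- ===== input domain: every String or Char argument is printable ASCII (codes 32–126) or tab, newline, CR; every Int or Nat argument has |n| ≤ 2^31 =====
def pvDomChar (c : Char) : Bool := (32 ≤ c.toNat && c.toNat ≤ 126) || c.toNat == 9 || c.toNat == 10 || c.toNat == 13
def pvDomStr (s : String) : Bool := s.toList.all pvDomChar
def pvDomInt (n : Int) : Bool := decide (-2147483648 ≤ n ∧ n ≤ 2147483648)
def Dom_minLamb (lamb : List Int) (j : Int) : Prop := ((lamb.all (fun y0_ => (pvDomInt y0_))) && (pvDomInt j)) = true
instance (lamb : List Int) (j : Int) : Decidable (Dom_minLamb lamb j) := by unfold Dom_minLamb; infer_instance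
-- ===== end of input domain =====

-- B replaces A's single-pass running-minimum loop (state: temp, index) by a stateless
-- two-pass decomposition: minimum value first, then first index holding it (objective: simpler).

-- ===== PORT A =====
-- lamb[i] under Pre_ (index in range); default never read inside Pre_
def pvVal (lamb : List Int) (k : Int) : Int := (PySem.List.pyGet? lamb k).getD 0

-- the 'while i < len(lamb)' loop of A, carrying (temp, index)
def minLambLoop (lamb : List Int) (n i temp index : Int) : Int :=
  if _h : i < n then
    if pvVal lamb i < temp then minLambLoop lamb n (i + 1) (pvVal lamb i) i
    else minLambLoop lamb n (i + 1) temp index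
  else index
termination_by (n - i).toNat
decreasing_by all_goals omega

def minLamb (lamb : List Int) (j : Int) : Int :=
  minLambLoop lamb (lamb.length : Int) j (pvVal lamb j) j

-- ===== PORT B =====
def minLamb_alt (lamb : List Int) (j : Int) : Int :=
  let n : Int := (lamb.length : Int)
  let r := PySem.List.pyRange j n 1
  let m := (PySem.List.min? (r.map (fun i => pvVal lamb i)) (fun x => x)).getD 0
  ((r.find? (fun i => pvVal lamb i == m)).getD 0)

-- ===== PRECONDITION & SPEC =====
-- A raises IndexError at lamb[j] exactly when j is out of range
def Pre_minLamb (lamb : List Int) (j : Int) : Prop := PySem.Raise.InRange lamb.length j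
instance (lamb : List Int) (j : Int) : Decidable (Pre_minLamb lamb j) := by unfold Pre_minLamb; infer_instance

def pvWitness_minLamb : List Int × Int := ([3, 1, 2], 0)

def Spec_minLamb (lamb : List Int) (j : Int) (out : Int) : Prop := out = minLamb_alt lamb j
instance (lamb : List Int) (j : Int) (out : Int) : Decidable (Spec_minLamb lamb j out) := by unfold Spec_minLamb; infer_instance

-- ===== CLAIM (what is proved, stated in full; the proofs are below) =====
def Claim_equal_minLamb : Prop := ∀ (lamb : List Int) (j : Int), Dom_minLamb lamb j → Pre_minLamb lamb j → Spec_minLamb lamb j (minLamb lamb j)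

-- ===== LEMMAS AND PROOFS =====

-- proof-side reformulation of A's loop as a fold over the list of remaining indices
def pvFoldLoop (lamb : List Int) : List Int → Int → Int → Int
  | [], _, idx => idx
  | k :: r, t, idx =>
      if pvVal lamb k < t then pvFoldLoop lamb r (pvVal lamb k) k
      else pvFoldLoop lamb r t idx

lemma minLambLoop_eq_fold (lamb : List Int) (n i t idx : Int) :
    minLambLoop lamb n i t idx = pvFoldLoop lamb (PySem.List.pyRange i n 1) t idx := by
  rw [minLambLoop]
  by_cases h : i < n
  · rw [dif_pos h, PySem.List.pyRange_one_cons h]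
    simp only [pvFoldLoop]
    split_ifs with hc
    · exact minLambLoop_eq_fold lamb n (i + 1) (pvVal lamb i) i
    · exact minLambLoop_eq_fold lamb n (i + 1) t idx
  · rw [dif_neg h, PySem.List.pyRange_one_eq_nil (by omega)]
    rfl
termination_by (n - i).toNat
decreasing_by all_goals omega

lemma foldl_min_le_init (L : List Int) (t : Int) : L.foldl min t ≤ t := by
  induction L generalizing t with
  | nil => simp
  | cons a r ih => exact le_trans (ih (min t a)) (min_le_left _ _)

lemma foldl_min_cases (L : List Int) (t : Int) :
    L.foldl min t = t ∨ L.foldl min t ∈ L := by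
  induction L generalizing t with
  | nil => simp
  | cons a r ih =>
    rcases ih (min t a) with h | h
    · simp only [List.foldl_cons, h]
      rcases le_total t a with hta | hat
      · left; simp [min_eq_left hta]
      · right; simp [min_eq_right hat]
    · right; simp [List.foldl_cons, h]

lemma fold_char (lamb : List Int) (L : List Int) (t idx : Int) :
    pvFoldLoop lamb L t idx =
      (if (L.map (pvVal lamb)).foldl min t < t
       then (L.find? (fun k => pvVal lamb k == (L.map (pvVal lamb)).foldl min t)).getD idx
       else idx) := by
  induction L generalizing t idx with
  | nil => simp [pvFoldLoop]
  | cons a r ih =>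
    by_cases hc : pvVal lamb a < t
    · -- loop takes the branch (temp := v a, index := a)
      have hmin : min t (pvVal lamb a) = pvVal lamb a := min_eq_right hc.le
      have hML : ((a :: r).map (pvVal lamb)).foldl min t
          = (r.map (pvVal lamb)).foldl min (pvVal lamb a) := by simp [hmin]
      rw [hML]
      have hstep : pvFoldLoop lamb (a :: r) t idx = pvFoldLoop lamb r (pvVal lamb a) a := by
        simp [pvFoldLoop, hc]
      rw [hstep, ih]
      set M := (r.map (pvVal lamb)).foldl min (pvVal lamb a) with hM
      have hMle : M ≤ pvVal lamb a := foldl_min_le_init _ _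
      have hMt : M < t := lt_of_le_of_lt hMle hc
      rw [if_pos hMt]
      by_cases hlt : M < pvVal lamb a
      · -- minimum strictly below v a: find? skips the head, and find? over r is some
        rw [if_pos hlt, List.find?_cons_of_neg (by simp only [beq_iff_eq]; omega)]
        have hmem : M ∈ r.map (pvVal lamb) := by
          rcases foldl_min_cases (r.map (pvVal lamb)) (pvVal lamb a) with h | h <;> rw [← hM] at h
          · omega
          · exact h
        rcases List.mem_map.mp hmem with ⟨k, hk, hvk⟩
        have hsome : (List.find? (fun k => pvVal lamb k == M) r).isSome := by
          rw [List.find?_isSome]; exact ⟨k, hk, by simp [hvk]⟩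
        obtain ⟨x, hx⟩ := Option.isSome_iff_exists.mp hsome
        simp [hx]
      · -- minimum equals v a: find? hits the head
        have heq : M = pvVal lamb a := le_antisymm hMle (not_lt.mp hlt)
        rw [if_neg hlt, List.find?_cons_of_pos (by simp [heq])]
        simp
    · -- t ≤ v a: state unchanged, head never the strict minimum
      have hmin : min t (pvVal lamb a) = t := min_eq_left (not_lt.mp hc)
      have hML : ((a :: r).map (pvVal lamb)).foldl min t
          = (r.map (pvVal lamb)).foldl min t := by simp [hmin]
      rw [hML]
      have hstep : pvFoldLoop lamb (a :: r) t idx = pvFoldLoop lamb r t idx := by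
        simp [pvFoldLoop, hc]
      rw [hstep, ih]
      set M := (r.map (pvVal lamb)).foldl min t with hM
      by_cases hlt : M < t
      · rw [if_pos hlt, if_pos hlt, List.find?_cons_of_neg (by simp only [beq_iff_eq]; omega)]
      · rw [if_neg hlt, if_neg hlt]

-- ===== VERDICT (by name: the statement is the Claim_ definition above) =====
theorem minLamb_spec : Claim_equal_minLamb := by
  intro lamb j _hdom hpre
  have hj : -(lamb.length : Int) ≤ j ∧ j < (lamb.length : Int) := by
    simpa [Pre_minLamb, PySem.Raise.InRange] using hpre
  unfold Spec_minLamb minLamb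
  have halt : minLamb_alt lamb j
      = ((PySem.List.pyRange j (lamb.length : Int) 1).find? (fun i => pvVal lamb i ==
          (PySem.List.min? ((PySem.List.pyRange j (lamb.length : Int) 1).map
            (fun i => pvVal lamb i)) (fun x => x)).getD 0)).getD 0 := rfl
  rw [halt, minLambLoop_eq_fold, PySem.List.pyRange_one_cons hj.2]
  set r := PySem.List.pyRange (j + 1) (lamb.length : Int) 1 with hr
  have hmincomp : (PySem.List.min? ((j :: r).map (fun i => pvVal lamb i)) (fun x => x)).getD 0
      = (r.map (pvVal lamb)).foldl min (pvVal lamb j) := by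
    rw [List.map_cons, PySem.List.min?_id_cons, Option.getD_some]
  rw [hmincomp]
  have hstep : pvFoldLoop lamb (j :: r) (pvVal lamb j) j = pvFoldLoop lamb r (pvVal lamb j) j := by
    simp [pvFoldLoop]
  rw [hstep, fold_char]
  set M := (r.map (pvVal lamb)).foldl min (pvVal lamb j) with hM
  have hMle : M ≤ pvVal lamb j := foldl_min_le_init _ _
  by_cases hlt : M < pvVal lamb j
  · -- the minimum lies strictly beyond position j: both sides find it in r
    rw [if_pos hlt, List.find?_cons_of_neg (by simp only [beq_iff_eq]; omega)]
    have hmem : M ∈ r.map (pvVal lamb) := by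
      rcases foldl_min_cases (r.map (pvVal lamb)) (pvVal lamb j) with h | h <;> rw [← hM] at h
      · omega
      · exact h
    rcases List.mem_map.mp hmem with ⟨k, hk, hvk⟩
    have hsome : (List.find? (fun k => pvVal lamb k == M) r).isSome := by
      rw [List.find?_isSome]; exact ⟨k, hk, by simp [hvk]⟩
    obtain ⟨x, hx⟩ := Option.isSome_iff_exists.mp hsome
    simp [hx]
  · -- the minimum equals lamb[j]: both sides return j
    have heq : M = pvVal lamb j := le_antisymm hMle (not_lt.mp hlt)
    rw [if_neg hlt, List.find?_cons_of_pos (by simp [heq])]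
    simp
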